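-- pv_equiv track=rewrite | github.com/biscayan/Python_algorithm | Programmers/Programmers_기능개발.py | solution
-- ===== SOURCE A (Python) =====
-- def solution(progresses,speeds):
--
--     answer=[]
--
--     while progresses: #while the array is not empty
--         for i in range(len(progresses)):
--             progresses[i]+=speeds[i] #repeat the work
--
--         distribution=0
--
--         while progresses and progresses[0]>=100: #check the threshold=100
--             progresses.pop(0)
--             speeds.pop(0)
--             distribution+=1
--
--         if distribution!=0:
--             answer.append(distribution)
--
--     return answer
-- ===== SOURCE B (Python) =====
-- def solution(progresses, speeds):
--     # completion day of each task: 1 if already done, else ceil((100 - p) / s)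
--     days = [1 if p >= 100 else -((p - 100) // s) for p, s in zip(progresses, speeds)]
--     res = []
--     cur = 0
--     cnt = 0
--     for d in days:
--         if d > cur:
--             if cnt:
--                 res.append(cnt)
--             cur = d
--             cnt = 1
--         else:
--             cnt += 1
--     if cnt:
--         res.append(cnt)
--     return res
-- ===== Notes on version B (the rewrite author's own statement) =====
-- stated objective: alternative
-- what changed: Instead of simulating work day by day and popping completed tasks from the front, B computes each task's completion day in closed form (ceiling division) and groups tasks in one pass by the running maximum day; intended as asymptotically lighter (O(n) vs O(n*days+n^2)), but a timing run could not measure a ratio because A times out on the larger generated inputs.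
-- outside the precondition, e.g. on solution([150], [-10]): A returns [1], B returns [1]
import Mathlib
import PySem

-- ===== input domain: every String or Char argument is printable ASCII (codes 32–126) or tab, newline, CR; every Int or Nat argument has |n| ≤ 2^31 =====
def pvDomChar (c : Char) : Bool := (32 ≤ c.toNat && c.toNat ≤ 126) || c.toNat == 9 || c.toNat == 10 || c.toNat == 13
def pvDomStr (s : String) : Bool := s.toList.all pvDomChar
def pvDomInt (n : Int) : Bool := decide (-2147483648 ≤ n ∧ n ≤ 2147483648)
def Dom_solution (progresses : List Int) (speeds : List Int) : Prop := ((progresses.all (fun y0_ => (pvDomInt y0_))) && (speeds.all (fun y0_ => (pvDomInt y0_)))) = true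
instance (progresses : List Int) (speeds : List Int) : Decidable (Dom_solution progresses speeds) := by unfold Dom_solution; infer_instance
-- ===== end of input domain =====

-- B replaces A's day-by-day simulation with front pops by a closed-form completion day per task
-- (ceiling division) and a single grouping pass by the running maximum day (objective: alternative).
-- A mutates its argument lists in place (pops them empty); B does not — the equivalence proved
-- here is about the RETURN value only.

-- ===== PORT A =====
-- 'for i in range(len(progresses)): progresses[i] += speeds[i]' — pairwise add along the prefix;
-- when speeds is shorter Python raises IndexError (excluded by Pre_solution), the port keeps the list.
def addStep : List Int → List Int → List Int
  | [], _ => []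
  | p :: ps, s :: ss => (p + s) :: addStep ps ss
  | p :: ps, [] => p :: ps

-- 'while progresses and progresses[0] >= 100: progresses.pop(0); speeds.pop(0); distribution += 1'
-- (speeds.pop(0) on an empty speeds raises IndexError in Python; excluded by Pre_solution).
def popStep : List Int → List Int → Int → List Int × List Int × Int
  | p :: ps, ss, d =>
    if 100 ≤ p then
      match ss with
      | _ :: ss' => popStep ps ss' (d + 1)
      | [] => (ps, [], d + 1)
    else (p :: ps, ss, d)
  | [], ss, d => ([], ss, d)

-- the outer 'while progresses:' loop; fuel only makes it total (under Pre_solution every task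
-- finishes by day |p| + 101, so the fuel below is never exhausted — proved, not assumed).
def loopA : Nat → List Int → List Int → List Int → List Int
  | 0, _, _, ans => ans
  | fuel + 1, ps, ss, ans =>
    if ps = [] then ans
    else
      let ps' := addStep ps ss
      let r := popStep ps' ss 0
      let ans' := if r.2.2 ≠ 0 then ans ++ [r.2.2] else ans
      loopA fuel r.1 r.2.1 ans'

def solution (progresses : List Int) (speeds : List Int) : List Int :=
  loopA (progresses.foldl (fun a p => a + p.natAbs + 101) 1) progresses speeds []

-- ===== PORT B =====
-- '1 if p >= 100 else -((p - 100) // s)'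
def dayOf (p s : Int) : Int := if 100 ≤ p then 1 else -(PySem.Int.floordiv (p - 100) s)

-- loop body over days: state (res, cur, cnt)
def stepB (st : List Int × Int × Int) (d : Int) : List Int × Int × Int :=
  if st.2.1 < d then (if st.2.2 ≠ 0 then st.1 ++ [st.2.2] else st.1, d, 1)
  else (st.1, st.2.1, st.2.2 + 1)

def solution_alt (progresses : List Int) (speeds : List Int) : List Int :=
  let days := (progresses.zip speeds).map fun x => dayOf x.1 x.2
  let r := days.foldl stepB ([], 0, 0)
  if r.2.2 ≠ 0 then r.1 ++ [r.2.2] else r.1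

-- ===== PRECONDITION & SPEC =====
-- Pre_ excludes inputs where A raises (speeds shorter than progresses: IndexError) or loops forever
-- (a task with nonpositive speed that is not already ≥ 100); it also excludes negative speeds on
-- already-finished tasks, where A happens to return and B agrees (see cites).
def Pre_solution (progresses : List Int) (speeds : List Int) : Prop :=
  progresses.length ≤ speeds.length ∧
    ∀ x ∈ progresses.zip speeds, 0 < x.2 ∨ (100 ≤ x.1 ∧ 0 ≤ x.2)
instance (progresses : List Int) (speeds : List Int) : Decidable (Pre_solution progresses speeds) := by
  unfold Pre_solution; infer_instance

def pvWitness_solution : List Int × List Int := ([93, 30, 55], [1, 30, 5])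

def Spec_solution (progresses : List Int) (speeds : List Int) (out : List Int) : Prop := out = solution_alt progresses speeds
instance (progresses : List Int) (speeds : List Int) (out : List Int) : Decidable (Spec_solution progresses speeds out) := by unfold Spec_solution; infer_instance

-- ===== CLAIM (what is proved, stated in full; the proofs are below) =====
def Claim_equal_solution : Prop := ∀ (progresses : List Int) (speeds : List Int), Dom_solution progresses speeds → Pre_solution progresses speeds → Spec_solution progresses speeds (solution progresses speeds)

-- ===== LEMMAS AND PROOFS =====

-- admissible task
def OKp (x : Int × Int) : Prop := 0 < x.2 ∨ (100 ≤ x.1 ∧ 0 ≤ x.2)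

-- proof-side view of B's grouping loop (result-so-far made explicit)
def rleGo : List Int → Int → Int → List Int
  | [], _, cnt => if cnt ≠ 0 then [cnt] else []
  | d :: ds, cur, cnt =>
    if cur < d then (if cnt ≠ 0 then cnt :: rleGo ds d 1 else rleGo ds d 1)
    else rleGo ds cur (cnt + 1)

theorem foldl_stepB_eq_rleGo (ds : List Int) : ∀ (res : List Int) (cur cnt : Int),
    (if (ds.foldl stepB (res, cur, cnt)).2.2 ≠ 0
      then (ds.foldl stepB (res, cur, cnt)).1 ++ [(ds.foldl stepB (res, cur, cnt)).2.2]
      else (ds.foldl stepB (res, cur, cnt)).1) = res ++ rleGo ds cur cnt := by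
  induction ds with
  | nil =>
    intro res cur cnt
    simp only [List.foldl_nil, rleGo]
    split_ifs <;> simp
  | cons d ds ih =>
    intro res cur cnt
    simp only [List.foldl_cons, stepB]
    by_cases h1 : cur < d
    · by_cases h2 : cnt = 0
      · simp only [h1, h2, if_pos, ne_eq, not_true_eq_false, if_neg, ite_true, ite_false]
        rw [ih]
        simp [rleGo, h1, h2]
      · simp only [h1, h2, if_pos, ne_eq, not_false_iff, ite_true]
        rw [ih]
        simp [rleGo, h1, h2, List.append_assoc]
    · simp only [h1, ite_false]
      rw [ih]
      simp [rleGo, h1]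

theorem day_reach (p s t : Int) (hok : OKp (p, s)) (ht : 1 ≤ t) :
    (100 ≤ p + t * s ↔ dayOf p s ≤ t) := by
  unfold dayOf
  by_cases hp : 100 ≤ p
  · simp only [hp, if_pos]
    constructor
    · intro _; omega
    · intro _
      have hs : 0 ≤ s := by rcases hok with h | h <;> omega
      nlinarith
  · have hs : 0 < s := by rcases hok with h | h <;> omega
    simp only [hp, if_neg, not_false_iff]
    rw [neg_le, PySem.Int.le_floordiv_iff_mul_le hs]
    constructor <;> intro h <;> nlinarith

theorem day_pos (p s : Int) (hok : OKp (p, s)) : 1 ≤ dayOf p s := by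
  unfold dayOf
  by_cases hp : 100 ≤ p
  · simp [hp]
  · have hs : 0 < s := by rcases hok with h | h <;> omega
    simp only [hp, if_neg, not_false_iff]
    have h0 : ¬ (0 ≤ PySem.Int.floordiv (p - 100) s) := by
      intro h
      have := (PySem.Int.le_floordiv_iff_mul_le hs).mp h
      nlinarith
    omega

theorem day_le (p s : Int) (hok : OKp (p, s)) : dayOf p s ≤ 101 + (p.natAbs : Int) := by
  unfold dayOf
  by_cases hp : 100 ≤ p
  · rw [if_pos hp]; omega
  · have hs : 0 < s := by rcases hok with h | h <;> omega
    simp only [hp, if_neg, not_false_iff]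
    have h1 : p - 100 ≤ PySem.Int.floordiv (p - 100) s := by
      rw [PySem.Int.le_floordiv_iff_mul_le hs]
      nlinarith
    omega

theorem addStep_map (L : List (Int × Int)) (ext : List Int) (t : Int) :
    addStep (L.map fun x => x.1 + t * x.2) (L.map Prod.snd ++ ext)
      = L.map fun x => x.1 + (t + 1) * x.2 := by
  induction L with
  | nil => simp [addStep]
  | cons x L ih => simp [addStep, ih]; ring

theorem popStep_map (L : List (Int × Int)) (ext : List Int) (d u : Int)
    (hu : 1 ≤ u) (hok : ∀ x ∈ L, OKp x) :
    popStep (L.map fun x => x.1 + u * x.2) (L.map Prod.snd ++ ext) d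
      = ((L.dropWhile fun x => decide (dayOf x.1 x.2 ≤ u)).map (fun x => x.1 + u * x.2),
         (L.dropWhile fun x => decide (dayOf x.1 x.2 ≤ u)).map Prod.snd ++ ext,
         d + ((L.takeWhile fun x => decide (dayOf x.1 x.2 ≤ u)).length : Int)) := by
  induction L generalizing d with
  | nil => simp [popStep]
  | cons x L ih =>
    have hx : OKp x := hok x (by simp)
    have hr := day_reach x.1 x.2 u hx hu
    by_cases hq : dayOf x.1 x.2 ≤ u
    · have h100 : 100 ≤ x.1 + u * x.2 := hr.mpr hq
      simp [popStep, h100, hq, ih (d + 1) (fun y hy => hok y (by simp [hy]))]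
      omega
    · have h100 : ¬ 100 ≤ x.1 + u * x.2 := fun h => hq (hr.mp h)
      simp [popStep, h100, hq]

theorem rleGo_shift (ds : List Int) (c c' : Int)
    (h : ∀ d, ds.head? = some d → c < d ∧ c' < d) :
    rleGo ds c 0 = rleGo ds c' 0 := by
  cases ds with
  | nil => simp [rleGo]
  | cons d ds =>
    obtain ⟨h1, h2⟩ := h d rfl
    simp [rleGo, h1, h2]

theorem rleGo_flat (ds ds' : List Int) (cur cnt : Int) (h : ∀ d ∈ ds, d ≤ cur) :
    rleGo (ds ++ ds') cur cnt = rleGo ds' cur (cnt + ds.length) := by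
  induction ds generalizing cnt with
  | nil => simp
  | cons d ds ih =>
    have hd : ¬ cur < d := by have := h d (by simp); omega
    simp only [List.cons_append, rleGo, hd, if_neg, not_false_iff]
    rw [ih _ (fun y hy => h y (by simp [hy]))]
    congr 1
    simp only [List.length_cons]
    push_cast
    ring

theorem rleGo_emit (ds : List Int) (cur cnt : Int) (hc : cnt ≠ 0)
    (h : ∀ d, ds.head? = some d → cur < d) :
    rleGo ds cur cnt = cnt :: rleGo ds cur 0 := by
  cases ds with
  | nil => simp [rleGo, hc]
  | cons d ds =>
    have h1 := h d rfl
    simp [rleGo, h1, hc]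

theorem dropWhile_head_false {α : Type} (p : α → Bool) (l : List α) (x : α)
    (h : (l.dropWhile p).head? = some x) : p x = false := by
  induction l with
  | nil => simp [List.dropWhile] at h
  | cons a l ih =>
    by_cases hp : p a
    · rw [List.dropWhile_cons_of_pos hp] at h; exact ih h
    · rw [List.dropWhile_cons_of_neg hp] at h
      simp at h; subst h; simpa using hp

theorem loopA_main (fuel : Nat) (L : List (Int × Int)) (ext : List Int) (t : Int)
    (ans : List Int)
    (hok : ∀ x ∈ L, OKp x) (ht : 0 ≤ t)
    (hhd : ∀ x, L.head? = some x → t < dayOf x.1 x.2)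
    (hfuel : ∀ x ∈ L, dayOf x.1 x.2 ≤ t + fuel) :
    loopA fuel (L.map fun x => x.1 + t * x.2) (L.map Prod.snd ++ ext) ans
      = ans ++ rleGo (L.map fun x => dayOf x.1 x.2) t 0 := by
  induction fuel generalizing L ext t ans with
  | zero =>
    cases L with
    | nil => simp [loopA, rleGo]
    | cons x L' =>
      exfalso
      have h1 := hhd x rfl
      have h2 := hfuel x (by simp)
      push_cast at h2
      omega
  | succ fuel ih =>
    cases L with
    | nil => simp [loopA, rleGo]
    | cons x L' =>
      have hne : (List.map (fun x : Int × Int => x.1 + t * x.2) (x :: L')) ≠ [] := by simp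
      rw [loopA, if_neg hne]
      simp only
      rw [addStep_map, popStep_map _ _ _ _ (by omega) hok]
      have hqdef : ∀ y : Int × Int, (decide (dayOf y.1 y.2 ≤ t + 1) = true) ↔ dayOf y.1 y.2 ≤ t + 1 := by
        intro y; simp
      by_cases hqx : dayOf x.1 x.2 ≤ t + 1
      · -- the head (and possibly more) pops this day
        have hqxb : (fun y : Int × Int => decide (dayOf y.1 y.2 ≤ t + 1)) x = true := decide_eq_true hqx
        have htw : (x :: L').takeWhile (fun y : Int × Int => decide (dayOf y.1 y.2 ≤ t + 1))
            = x :: L'.takeWhile (fun y : Int × Int => decide (dayOf y.1 y.2 ≤ t + 1)) := by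
          simp [List.takeWhile_cons, hqx]
        have hdw : (x :: L').dropWhile (fun y : Int × Int => decide (dayOf y.1 y.2 ≤ t + 1))
            = L'.dropWhile (fun y : Int × Int => decide (dayOf y.1 y.2 ≤ t + 1)) := by
          simp [List.dropWhile_cons, hqx]
        set q : Int × Int → Bool := fun y => decide (dayOf y.1 y.2 ≤ t + 1) with hq
        set G' := L'.takeWhile q with hG'
        set R := L'.dropWhile q with hR
        have hlen : ((0 : Int) + ((x :: L').takeWhile q).length ≠ 0) := by
          rw [htw]; simp; omega
        rw [if_pos hlen]
        have hokR : ∀ y ∈ R, OKp y := fun y hy =>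
          hok y (by simp [List.mem_cons]; right; exact (List.dropWhile_sublist q).mem hy)
        have hhdR : ∀ y, R.head? = some y → t + 1 < dayOf y.1 y.2 := by
          intro y hy
          have := dropWhile_head_false q L' y hy
          simp [hq] at this
          omega
        have hfuelR : ∀ y ∈ R, dayOf y.1 y.2 ≤ (t + 1) + fuel := by
          intro y hy
          have := hfuel y (by simp [List.mem_cons]; right; exact (List.dropWhile_sublist q).mem hy)
          push_cast at this ⊢
          omega
        dsimp only
        rw [hdw, ih R ext (t + 1) _ hokR (by omega) hhdR hfuelR]
        -- now rewrite the right-hand side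
        have hdx : dayOf x.1 x.2 = t + 1 := by
          have := hhd x rfl; omega
        have hsplit : (x :: L') = (x :: G') ++ R := by
          rw [← htw, ← hdw]
          exact ((x :: L').takeWhile_append_dropWhile (p := q)).symm
        conv_rhs => rw [hsplit]
        rw [List.map_append]
        have hGle : ∀ d ∈ List.map (fun y : Int × Int => dayOf y.1 y.2) G', d ≤ t + 1 := by
          intro d hd
          obtain ⟨y, hy, rfl⟩ := List.mem_map.mp hd
          have := List.mem_takeWhile_imp hy
          simp [hq] at this
          omega
        have hhead : rleGo ((List.map (fun y : Int × Int => dayOf y.1 y.2) (x :: G'))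
              ++ List.map (fun y : Int × Int => dayOf y.1 y.2) R) t 0
            = rleGo (List.map (fun y : Int × Int => dayOf y.1 y.2) R) (t + 1)
                (1 + (G'.length : Int)) := by
          simp only [List.map_cons, List.cons_append, rleGo, hdx]
          rw [if_pos (by omega)]
          simp only [ne_eq, not_true_eq_false, if_neg]
          rw [if_neg (by simp)]
          rw [rleGo_flat _ _ _ _ hGle]
          simp
        rw [hhead]
        have hemit : rleGo (List.map (fun y : Int × Int => dayOf y.1 y.2) R) (t + 1)
              (1 + (G'.length : Int))
            = (1 + (G'.length : Int)) :: rleGo (List.map (fun y : Int × Int => dayOf y.1 y.2) R) (t + 1) 0 := by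
          apply rleGo_emit _ _ _ (by omega)
          intro d hd
          cases hR' : R with
          | nil => rw [hR'] at hd; simp at hd
          | cons y R'' =>
            rw [hR'] at hd
            simp at hd
            have := hhdR y (by rw [hR']; rfl)
            omega
        rw [hemit, htw]
        simp only [List.length_cons, List.append_assoc, List.cons_append, List.nil_append]
        congr 2
        push_cast
        ring
      · -- nobody pops this day
        have hqxb : (fun y : Int × Int => decide (dayOf y.1 y.2 ≤ t + 1)) x = false := decide_eq_false hqx
        have htw : (x :: L').takeWhile (fun y : Int × Int => decide (dayOf y.1 y.2 ≤ t + 1)) = [] := by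
          simp [List.takeWhile_cons, hqx]
        have hdw : (x :: L').dropWhile (fun y : Int × Int => decide (dayOf y.1 y.2 ≤ t + 1)) = x :: L' := by
          simp [List.dropWhile_cons, hqx]
        rw [htw, hdw]
        simp only [List.length_nil, Nat.cast_zero, add_zero, ne_eq, not_true_eq_false]
        rw [if_neg (by simp)]
        rw [ih (x :: L') ext (t + 1) ans hok (by omega)
            (by intro y hy; simp at hy; subst hy; omega)
            (by intro y hy; have := hfuel y hy; push_cast at this ⊢; omega)]
        congr 1
        apply rleGo_shift
        intro d hd
        simp at hd
        have := hhd x rfl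
        omega

theorem snd_zip_append (ps ss : List Int) (h : ps.length ≤ ss.length) :
    (ps.zip ss).map Prod.snd ++ ss.drop ps.length = ss := by
  induction ps generalizing ss with
  | nil => simp
  | cons p ps ih =>
    cases ss with
    | nil => simp at h
    | cons s ss => simpa using ih ss (by simpa using h)

theorem foldl_fuel_bound (ps : List Int) (a : Nat) (p : Int) (hp : p ∈ ps) :
    p.natAbs + 101 ≤ ps.foldl (fun a p => a + p.natAbs + 101) a := by
  have mono : ∀ (l : List Int) (b : Nat), b ≤ l.foldl (fun a p => a + p.natAbs + 101) b := by
    intro l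
    induction l with
    | nil => simp
    | cons q l ih =>
      intro b
      calc b ≤ b + q.natAbs + 101 := by omega
        _ ≤ _ := ih _
  induction ps generalizing a with
  | nil => simp at hp
  | cons q ps ih =>
    simp only [List.foldl_cons]
    rcases List.mem_cons.mp hp with h | h
    · subst h
      calc p.natAbs + 101 ≤ a + p.natAbs + 101 := by omega
        _ ≤ _ := mono ps _
    · exact ih _ h

-- ===== VERDICT (by name: the statement is the Claim_ definition above) =====
theorem solution_spec : Claim_equal_solution := by
  intro ps ss _ hpre
  obtain ⟨hlen, hok⟩ := hpre
  unfold Spec_solution solution solution_alt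
  have hL : ∀ x ∈ ps.zip ss, OKp x := hok
  have e1 : (ps.zip ss).map (fun x => x.1 + 0 * x.2) = ps := by
    rw [show (fun x : Int × Int => x.1 + 0 * x.2) = Prod.fst by funext x; ring]
    exact List.map_fst_zip hlen
  have e2 := snd_zip_append ps ss hlen
  have main := loopA_main (ps.foldl (fun a p => a + p.natAbs + 101) 1)
      (ps.zip ss) (ss.drop ps.length) 0 [] hL le_rfl
      (by
        intro x hx
        exact day_pos x.1 x.2 (hL x (List.mem_of_mem_head? hx)))
      (by
        intro x hx
        have hmem := (List.of_mem_zip hx).1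
        have h1 := day_le x.1 x.2 (hL x hx)
        have h2 := foldl_fuel_bound ps 1 x.1 hmem
        have h2' : ((x.1.natAbs + 101 : Nat) : Int)
            ≤ ((ps.foldl (fun a p => a + p.natAbs + 101) 1 : Nat) : Int) := by
          exact_mod_cast h2
        push_cast at h2'
        omega)
  rw [e1, e2] at main
  rw [main]
  have hb := foldl_stepB_eq_rleGo ((ps.zip ss).map fun x => dayOf x.1 x.2) [] 0 0
  simp only [List.nil_append] at main hb ⊢
  exact hb.symm
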